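-- pv_equiv track=rewrite | github.com/t4bt/lecture | ads/subsetsum.py | part_sum1
-- ===== SOURCE A (Python) =====
-- def part_sum1(a, W):
--     #初期化
--     N=len(a)
--     dp=[[0 for i in range(W+1)] for j in range(N+1)]
--     #DP
--     for i in range(1,N+1):
--         for j in range(W+1):
--             if j < a[i-1]:
--                 dp[i][j] = dp[i-1][j]
--             else:
--                 dp[i][j] = max(dp[i-1][j], a[i-1]+dp[i-1][j-a[i-1]])
--     return dp[N][W]
-- ===== SOURCE B (Python) =====
-- def part_sum1(a, W):
--     reachable = {0}
--     for x in a: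
--         reachable |= {s + x for s in reachable if s + x <= W}
--     return max(s for s in reachable if s <= W)
-- ===== Notes on version B (the rewrite author's own statement) =====
-- stated objective: simpler
-- what changed: Replaces the (N+1)x(W+1) dp table and per-capacity max recurrence by a single evolving set of reachable subset sums capped at W, returning the largest one not exceeding W.
import Mathlib
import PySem

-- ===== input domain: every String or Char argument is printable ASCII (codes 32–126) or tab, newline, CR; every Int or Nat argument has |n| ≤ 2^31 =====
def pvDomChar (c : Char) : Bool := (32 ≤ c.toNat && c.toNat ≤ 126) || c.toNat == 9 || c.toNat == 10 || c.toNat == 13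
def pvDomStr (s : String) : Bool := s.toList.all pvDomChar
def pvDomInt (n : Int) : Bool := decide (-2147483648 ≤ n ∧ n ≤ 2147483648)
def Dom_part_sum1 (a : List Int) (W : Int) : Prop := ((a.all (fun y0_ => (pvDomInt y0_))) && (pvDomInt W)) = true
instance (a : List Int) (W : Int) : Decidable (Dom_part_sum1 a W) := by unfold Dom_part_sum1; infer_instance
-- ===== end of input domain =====

-- B replaces A's (N+1)x(W+1) dp table by a single evolving set of reachable subset sums capped at W: simpler, and measured faster when W is large (A's work is always N*W, B's is N*|reachable|).


-- ===== PORT A =====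
-- Literal port: dp is the full (N+1)×(W+1) table, built by the two nested range loops;
-- all indexing through pyGetD/pySetD (in range under Pre_part_sum1).
def part_sum1 (a : List Int) (W : Int) : Int :=
  let N : Int := a.length
  let dp0 : List (List Int) :=
    (PySem.List.pyRange 0 (N+1) 1).map (fun _ => (PySem.List.pyRange 0 (W+1) 1).map (fun _ => (0:Int)))
  let dp :=
    (PySem.List.pyRange 1 (N+1) 1).foldl (fun dp i =>
      (PySem.List.pyRange 0 (W+1) 1).foldl (fun dp j =>
        let ai := PySem.List.pyGetD a (i-1) 0
        let v : Int :=
          if j < ai then PySem.List.pyGetD (PySem.List.pyGetD dp (i-1) []) j 0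
          else max (PySem.List.pyGetD (PySem.List.pyGetD dp (i-1) []) j 0)
                   (ai + PySem.List.pyGetD (PySem.List.pyGetD dp (i-1) []) (j - ai) 0)
        PySem.List.pySetD dp i (PySem.List.pySetD (PySem.List.pyGetD dp i []) j v)) dp) dp0
  PySem.List.pyGetD (PySem.List.pyGetD dp N []) W 0

-- ===== PORT B =====
-- reachable |= {s + x for s in reachable if s + x <= W}
def psStep (W : Int) (r : PySem.Set Int) (x : Int) : PySem.Set Int :=
  PySem.Set.union r (PySem.Set.ofList ((r.filter (fun s => decide (s + x ≤ W))).map (fun s => s + x)))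

def part_sum1_alt (a : List Int) (W : Int) : Int :=
  let reachable : PySem.Set Int := a.foldl (psStep W) (PySem.Set.ofList [0])
  -- max(s for s in reachable if s <= W): under Pre_ (0 ≤ W) the filtered set contains 0,
  -- so the generator is nonempty and max? is never none
  (PySem.List.max? (reachable.filter (fun s => decide (s ≤ W))) (fun s => s)).getD 0

-- ===== PRECONDITION & SPEC =====
-- Exactly the inputs on which the Python A returns: W ≥ 0 (else dp rows are empty and
-- dp[N][W] raises IndexError) and no negative element (else dp[i-1][j-a[i-1]] raises IndexError).
def Pre_part_sum1 (a : List Int) (W : Int) : Prop := 0 ≤ W ∧ ∀ x ∈ a, 0 ≤ x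
instance (a : List Int) (W : Int) : Decidable (Pre_part_sum1 a W) := by unfold Pre_part_sum1; infer_instance

def pvWitness_part_sum1 : List Int × Int := ([0], 1)

def Spec_part_sum1 (a : List Int) (W : Int) (out : Int) : Prop := out = part_sum1_alt a W
instance (a : List Int) (W : Int) (out : Int) : Decidable (Spec_part_sum1 a W out) := by unfold Spec_part_sum1; infer_instance

-- ===== CLAIM (what is proved, stated in full; the proofs are below) =====
def Claim_equal_part_sum1 : Prop := ∀ (a : List Int) (W : Int), Dom_part_sum1 a W → Pre_part_sum1 a W → Spec_part_sum1 a W (part_sum1 a W)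

-- ===== LEMMAS AND PROOFS =====

-- functional description of one dp row
def zerosRow (W : Int) : List Int := (List.range (W+1).toNat).map (fun _ => (0:Int))

def rowEntry (W : Int) (prev : List Int) (x j : Int) : Int :=
  if j < x then PySem.List.pyGetD prev j 0
  else max (PySem.List.pyGetD prev j 0) (x + PySem.List.pyGetD prev (j - x) 0)

def rowF (W : Int) (prev : List Int) (x : Int) : List Int :=
  (List.range (W+1).toNat).map (fun j : Nat => rowEntry W prev x (j : Int))

def rows (a : List Int) (W : Int) : List Int := a.foldl (rowF W) (zerosRow W)

-- running max with floor 0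
def mx (l : List Int) : Int := l.foldl max 0


-- ---------- generic helpers ----------

theorem pyGetD_pySetD_self {α : Type} (dp : List α) (i : Int) (r : α) (d : α)
    (h0 : 0 ≤ i) (h1 : i < (dp.length : Int)) :
    PySem.List.pyGetD (PySem.List.pySetD dp i r) i d = r := by
  rw [PySem.List.pySetD_of_nonneg _ _ h0,
      PySem.List.pyGetD_eq_getElem _ _ h0 (by simpa using h1)]
  simp [List.getElem_set]

theorem pyGetD_pySetD_ne {α : Type} (dp : List α) (i k : Int) (r : α) (d : α)
    (h0 : 0 ≤ i) (h1 : i < (dp.length : Int)) (h2 : 0 ≤ k) (h3 : k < (dp.length : Int))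
    (hne : k ≠ i) :
    PySem.List.pyGetD (PySem.List.pySetD dp i r) k d = PySem.List.pyGetD dp k d := by
  rw [PySem.List.pySetD_of_nonneg _ _ h0,
      PySem.List.pyGetD_eq_getElem _ _ h2 (by simp; omega),
      PySem.List.pyGetD_eq_getElem _ _ h2 (by simpa using h3)]
  rw [List.getElem_set_ne (by omega)]

theorem set_map_range {α : Type} (n m : Nat) (g : Nat → α) (r : α) (hm : m < n) :
    ((List.range n).map g).set m r
      = (List.range n).map (fun k => if k = m then r else g k) := by
  apply List.ext_getElem
  · simp
  · intro k hk1 hk2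
    rcases eq_or_ne k m with rfl | h
    · simp [List.getElem_map, List.getElem_range]
    · rw [List.getElem_set_ne (by omega)]
      simp [List.getElem_map, List.getElem_range, h]

theorem pyGetD_map_range {α : Type} (n : Nat) (g : Nat → α) (d : α) (j : Int)
    (h0 : 0 ≤ j) (h1 : j < (n : Int)) :
    PySem.List.pyGetD ((List.range n).map g) j d = g j.toNat := by
  rw [PySem.List.pyGetD_eq_getElem _ _ h0 (by simp; omega)]
  simp [List.getElem_map, List.getElem_range]

-- ---------- running max with floor 0 ----------

theorem mx_nonneg (l : List Int) : 0 ≤ mx l := (PySem.List.le_foldl_max l 0).1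

theorem mx_ge (l : List Int) {s : Int} (h : s ∈ l) : s ≤ mx l :=
  (PySem.List.le_foldl_max l 0).2 s h

theorem foldl_max_le_of (l : List Int) (c : Int) :
    ∀ init, init ≤ c → (∀ s ∈ l, s ≤ c) → l.foldl max init ≤ c := by
  induction l with
  | nil => intro init hi _; simpa using hi
  | cons x t ih =>
      intro init hi h
      simp only [List.foldl_cons]
      exact ih _ (by have := h x (by simp); omega) (fun s hs => h s (by simp [hs]))

theorem mx_le (l : List Int) (c : Int) (h0 : 0 ≤ c) (h : ∀ s ∈ l, s ≤ c) : mx l ≤ c :=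
  foldl_max_le_of l c 0 h0 h

theorem mx_exists (l : List Int) (h0 : (0:Int) ∈ l) : ∃ s ∈ l, mx l = s := by
  rcases PySem.List.foldl_max_mem l 0 with h | h
  · exact ⟨0, h0, h⟩
  · exact ⟨mx l, h, rfl⟩

theorem mx_congr (l l' : List Int) (h : ∀ s : Int, s ∈ l ↔ s ∈ l') : mx l = mx l' := by
  apply le_antisymm
  · exact mx_le _ _ (mx_nonneg l') (fun s hs => mx_ge l' ((h s).1 hs))
  · exact mx_le _ _ (mx_nonneg l) (fun s hs => mx_ge l ((h s).2 hs))

-- ---------- B side: reachable-set semantics ----------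

def flt (R : List Int) (j : Int) : List Int := R.filter (fun s => decide (s ≤ j))

theorem mem_flt {R : List Int} {j s : Int} : s ∈ flt R j ↔ s ∈ R ∧ s ≤ j := by
  simp [flt]

def GoodR (W : Int) (R : List Int) : Prop := (0:Int) ∈ R ∧ ∀ s ∈ R, 0 ≤ s ∧ s ≤ W

theorem mem_psStep {W x y : Int} {R : PySem.Set Int} :
    y ∈ psStep W R x ↔ y ∈ R ∨ ∃ s ∈ R, s + x ≤ W ∧ y = s + x := by
  simp only [psStep, PySem.Set.mem_union, PySem.Set.mem_ofList, List.mem_map,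
    List.mem_filter, decide_eq_true_eq]
  constructor
  · rintro (h | ⟨s, ⟨hs, hle⟩, rfl⟩)
    · exact Or.inl h
    · exact Or.inr ⟨s, hs, hle, rfl⟩
  · rintro (h | ⟨s, hs, hle, rfl⟩)
    · exact Or.inl h
    · exact Or.inr ⟨s, ⟨hs, hle⟩, rfl⟩

theorem goodR_step {W x : Int} {R : PySem.Set Int} (hx : 0 ≤ x) (hR : GoodR W R) :
    GoodR W (psStep W R x) := by
  obtain ⟨h0, hb⟩ := hR
  refine ⟨mem_psStep.2 (Or.inl h0), ?_⟩
  intro s hs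
  rcases mem_psStep.1 hs with h | ⟨t, ht, hle, rfl⟩
  · exact hb s h
  · have := hb t ht; omega

-- ---------- the dp-row / reachable-set invariant ----------

def Link (W : Int) (prev R : List Int) : Prop :=
  ∀ j : Int, 0 ≤ j → j ≤ W → PySem.List.pyGetD prev j 0 = mx (flt R j)

theorem pyGetD_zerosRow {W j : Int} (h0 : 0 ≤ j) (h1 : j ≤ W) :
    PySem.List.pyGetD (zerosRow W) j 0 = 0 := by
  rw [zerosRow, pyGetD_map_range _ _ _ j h0 (by omega)]

theorem link_init (W : Int) : Link W (zerosRow W) [0] := by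
  intro j h0 h1
  rw [pyGetD_zerosRow h0 h1]
  have : flt [0] j = [0] := by simp [flt, h0]
  rw [this]; simp [mx]

theorem pyGetD_rowF {W : Int} (prev : List Int) (x j : Int) (h0 : 0 ≤ j) (h1 : j ≤ W) :
    PySem.List.pyGetD (rowF W prev x) j 0 = rowEntry W prev x j := by
  rw [rowF, pyGetD_map_range _ _ _ j h0 (by omega)]
  rw [Int.toNat_of_nonneg h0]

theorem link_step {W x : Int} (hW : 0 ≤ W) (hx : 0 ≤ x) {prev : List Int}
    {R : PySem.Set Int} (hR : GoodR W R) (hL : Link W prev R) :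
    Link W (rowF W prev x) (psStep W R x) := by
  intro j hj0 hjW
  rw [pyGetD_rowF prev x j hj0 hjW, rowEntry]
  obtain ⟨h0R, hbR⟩ := hR
  by_cases hcase : j < x
  · rw [if_pos hcase, hL j hj0 hjW]
    apply mx_congr
    intro s
    rw [mem_flt, mem_flt]
    constructor
    · rintro ⟨hs, hle⟩; exact ⟨mem_psStep.2 (Or.inl hs), hle⟩
    · rintro ⟨hs, hle⟩
      rcases mem_psStep.1 hs with h | ⟨t, ht, hWle, rfl⟩
      · exact ⟨h, hle⟩
      · exact absurd (hbR t ht).1 (by omega)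
  · rw [if_neg hcase]
    have hxj : x ≤ j := by omega
    rw [hL j hj0 hjW, hL (j - x) (by omega) (by omega)]
    apply le_antisymm
    · apply max_le
      · exact mx_le _ _ (mx_nonneg _) (fun s hs => by
          obtain ⟨hsR, hsle⟩ := mem_flt.1 hs
          exact mx_ge _ (mem_flt.2 ⟨mem_psStep.2 (Or.inl hsR), hsle⟩))
      · obtain ⟨s, hs, hmx⟩ := mx_exists (flt R (j - x)) (mem_flt.2 ⟨h0R, by omega⟩)
        obtain ⟨hsR, hsle⟩ := mem_flt.1 hs
        have hm : s + x ∈ flt (psStep W R x) j :=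
          mem_flt.2 ⟨mem_psStep.2 (Or.inr ⟨s, hsR, by omega, rfl⟩), by omega⟩
        have := mx_ge _ hm
        omega
    · apply mx_le _ _ (le_max_of_le_left (mx_nonneg _))
      intro s hs
      obtain ⟨hsR', hsle⟩ := mem_flt.1 hs
      rcases mem_psStep.1 hsR' with h | ⟨t, ht, hWle, rfl⟩
      · exact le_max_of_le_left (mx_ge _ (mem_flt.2 ⟨h, hsle⟩))
      · exact le_max_of_le_right (by
          have : t ≤ mx (flt R (j - x)) := mx_ge _ (mem_flt.2 ⟨ht, by omega⟩)
          omega)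

theorem rows_link (W : Int) (hW : 0 ≤ W) (a : List Int) (ha : ∀ x ∈ a, 0 ≤ x) :
    Link W (rows a W) (a.foldl (psStep W) (PySem.Set.ofList [0]))
      ∧ GoodR W (a.foldl (psStep W) (PySem.Set.ofList [0])) := by
  have h0 : PySem.Set.ofList [(0:Int)] = [0] := by decide
  rw [h0, rows]
  suffices h : ∀ (l : List Int), (∀ x ∈ l, 0 ≤ x) → ∀ (prev : List Int) (R : PySem.Set Int),
      Link W prev R → GoodR W R →
      Link W (l.foldl (rowF W) prev) (l.foldl (psStep W) R)
        ∧ GoodR W (l.foldl (psStep W) R) by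
    exact h a ha (zerosRow W) [0] (link_init W) ⟨by simp, by intro s hs; simp at hs; omega⟩
  intro l
  induction l with
  | nil => intro _ prev R hL hR; exact ⟨hL, hR⟩
  | cons x t ih =>
      intro hl prev R hL hR
      have hx : 0 ≤ x := hl x (by simp)
      simp only [List.foldl_cons]
      exact ih (fun y hy => hl y (by simp [hy])) _ _
        (link_step hW hx hR hL) (goodR_step hx hR)

-- ---------- A side: the dp table computes `rows` ----------

def tbl (a : List Int) (W : Int) (i : Nat) : List (List Int) :=
  (List.range (a.length + 1)).map (fun k => if k ≤ i then rows (a.take k) W else zerosRow W)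

theorem length_zerosRow (W : Int) : (zerosRow W).length = (W + 1).toNat := by
  simp [zerosRow]

theorem tbl_get (a : List Int) (W : Int) (i : Nat) (k : Int)
    (h0 : 0 ≤ k) (h1 : k ≤ (a.length : Int)) :
    PySem.List.pyGetD (tbl a W i) k [] =
      if k.toNat ≤ i then rows (a.take k.toNat) W else zerosRow W := by
  rw [tbl, pyGetD_map_range _ _ _ k h0 (by push_cast; omega)]

-- the inner j-loop overwrites row i of dp with `rowF W prev x`, prev := dp[i-1]
theorem inner_loop (W : Int) (hW : 0 ≤ W) (x : Int) (dp : List (List Int)) (i : Int)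
    (hi1 : 1 ≤ i) (hi2 : i < (dp.length : Int))
    (hrl : (PySem.List.pyGetD dp i []).length = (W + 1).toNat) :
    (PySem.List.pyRange 0 (W + 1) 1).foldl
      (fun dp' j =>
        PySem.List.pySetD dp' i
          (PySem.List.pySetD (PySem.List.pyGetD dp' i []) j
            (if j < x then PySem.List.pyGetD (PySem.List.pyGetD dp' (i - 1) []) j 0
             else max (PySem.List.pyGetD (PySem.List.pyGetD dp' (i - 1) []) j 0)
                      (x + PySem.List.pyGetD (PySem.List.pyGetD dp' (i - 1) []) (j - x) 0)))) dp
    = PySem.List.pySetD dp i (rowF W (PySem.List.pyGetD dp (i - 1) []) x) := by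
  set prev := PySem.List.pyGetD dp (i - 1) [] with hprev
  set row0 := PySem.List.pyGetD dp i [] with hrow0
  have hgo : ∀ m : Nat, (m : Int) ≤ W + 1 →
      (PySem.List.pyRange 0 (m : Int) 1).foldl
        (fun dp' j =>
          PySem.List.pySetD dp' i
            (PySem.List.pySetD (PySem.List.pyGetD dp' i []) j
              (if j < x then PySem.List.pyGetD (PySem.List.pyGetD dp' (i - 1) []) j 0
               else max (PySem.List.pyGetD (PySem.List.pyGetD dp' (i - 1) []) j 0)
                        (x + PySem.List.pyGetD (PySem.List.pyGetD dp' (i - 1) []) (j - x) 0)))) dp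
      = PySem.List.pySetD dp i
          (((List.range m).map (fun j : Nat => rowEntry W prev x (j : Int))) ++ row0.drop m) := by
    intro m
    induction m with
    | zero =>
        intro _
        rw [PySem.List.pyRange_one_eq_nil (by simp)]
        simp only [List.foldl_nil, List.range_zero, List.map_nil, List.drop_zero, List.nil_append]
        rw [hrow0, PySem.List.pySetD_of_nonneg _ _ (by omega),
            PySem.List.pyGetD_eq_getElem _ _ (by omega) (by exact_mod_cast hi2)]
        exact (List.set_getElem_self (by omega)).symm
    | succ m ih =>
        intro hm1
        have hmW : (m : Int) ≤ W + 1 := by push_cast at hm1 ⊢; omega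
        have hmn : m < (W + 1).toNat := by omega
        have hrlen : row0.length = (W + 1).toNat := hrl
        have hcast : ((m + 1 : Nat) : Int) = (m : Int) + 1 := by push_cast; ring
        rw [hcast, PySem.List.pyRange_one_succ_right (by omega), List.foldl_append, ih hmW]
        simp only [List.foldl_cons, List.foldl_nil]
        have hlen' : i < ((PySem.List.pySetD dp i
            ((List.range m).map (fun j : Nat => rowEntry W prev x (j : Int)) ++ row0.drop m)).length : Int) := by
          rw [PySem.List.pySetD_of_nonneg _ _ (by omega)]
          simpa using hi2
        rw [pyGetD_pySetD_ne dp i (i-1) _ [] (by omega) hi2 (by omega) (by omega) (by omega)]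
        rw [pyGetD_pySetD_self dp i _ [] (by omega) hi2]
        rw [PySem.List.pySetD_of_nonneg _ _ (by omega),
            PySem.List.pySetD_of_nonneg _ _ (by omega),
            PySem.List.pySetD_of_nonneg _ _ (by omega),
            PySem.List.pySetD_of_nonneg _ _ (by omega)]
        rw [List.set_set]
        congr 1
        have hlm : ((List.range m).map (fun j : Nat => rowEntry W prev x (j : Int))).length = m := by
          simp
        have hsplit : row0.drop m = row0[m] :: row0.drop (m + 1) :=
          List.drop_eq_getElem_cons (by omega)
        simp only [Int.toNat_natCast]
        rw [hsplit]
        rw [List.range_succ, List.map_append]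
        have hv : (if (m : Int) < x then
              PySem.List.pyGetD (PySem.List.pyGetD dp (i - 1) []) (m : Int) 0
            else
              max (PySem.List.pyGetD (PySem.List.pyGetD dp (i - 1) []) (m : Int) 0)
                (x + PySem.List.pyGetD (PySem.List.pyGetD dp (i - 1) []) ((m : Int) - x) 0))
            = rowEntry W prev x (m : Int) := rfl
        rw [hv]
        have : ((List.range m).map (fun j : Nat => rowEntry W prev x (j : Int))
              ++ (row0[m] :: row0.drop (m + 1))).set m (rowEntry W prev x (m : Int))
            = (List.range m).map (fun j : Nat => rowEntry W prev x (j : Int))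
              ++ ((row0[m] :: row0.drop (m + 1)).set 0 (rowEntry W prev x (m : Int))) := by
          rw [List.set_append]
          simp [hlm]
        rw [this, List.set_cons_zero]
        simp only [List.append_assoc, List.singleton_append, List.map_cons, List.map_nil]
  have hWn : (((W + 1).toNat : Nat) : Int) = W + 1 := by omega
  have := hgo (W + 1).toNat (by omega)
  rw [hWn] at this
  rw [this]
  congr 1
  rw [rowF, List.drop_eq_nil_of_le (by rw [hrl]), List.append_nil]

theorem outer_loop (a : List Int) (W : Int) (hW : 0 ≤ W) (i : Nat) (hi : i ≤ a.length) :
    (PySem.List.pyRange 1 ((i : Int) + 1) 1).foldl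
      (fun dp ii =>
        (PySem.List.pyRange 0 (W + 1) 1).foldl
          (fun dp' j =>
            PySem.List.pySetD dp' ii
              (PySem.List.pySetD (PySem.List.pyGetD dp' ii []) j
                (if j < PySem.List.pyGetD a (ii - 1) 0 then
                   PySem.List.pyGetD (PySem.List.pyGetD dp' (ii - 1) []) j 0
                 else
                   max (PySem.List.pyGetD (PySem.List.pyGetD dp' (ii - 1) []) j 0)
                       (PySem.List.pyGetD a (ii - 1) 0 +
                         PySem.List.pyGetD (PySem.List.pyGetD dp' (ii - 1) [])
                           (j - PySem.List.pyGetD a (ii - 1) 0) 0)))) dp) (tbl a W 0)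
    = tbl a W i := by
  induction i with
  | zero =>
      rw [show ((0 : Nat) : Int) + 1 = 1 by norm_num, PySem.List.pyRange_one_eq_nil le_rfl,
          List.foldl_nil]
  | succ i ih =>
      have hiN : i ≤ a.length := by omega
      have hilt : i < a.length := by omega
      have hcast : ((i + 1 : Nat) : Int) + 1 = ((i : Int) + 1) + 1 := by push_cast; ring
      have hsplit : PySem.List.pyRange 1 (((i : Int) + 1) + 1) 1
          = PySem.List.pyRange 1 ((i : Int) + 1) 1 ++ [(i : Int) + 1] :=
        PySem.List.pyRange_one_succ_right (by omega)
      rw [hcast, hsplit, List.foldl_append, ih hiN]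
      simp only [List.foldl_cons, List.foldl_nil]
      have hlen : ((tbl a W i).length : Int) = (a.length : Int) + 1 := by
        simp [tbl]
      have hrl : (PySem.List.pyGetD (tbl a W i) ((i : Int) + 1) []).length = (W + 1).toNat := by
        rw [tbl_get a W i ((i : Int) + 1) (by omega) (by push_cast; omega)]
        rw [if_neg (by omega)]
        exact length_zerosRow W
      rw [inner_loop W hW (PySem.List.pyGetD a ((i : Int) + 1 - 1) 0) (tbl a W i)
            ((i : Int) + 1) (by omega) (by rw [hlen]; push_cast; omega) hrl]
      have h1 : (i : Int) + 1 - 1 = (i : Int) := by ring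
      rw [h1]
      have hprev : PySem.List.pyGetD (tbl a W i) (i : Int) [] = rows (a.take i) W := by
        rw [tbl_get a W i (i : Int) (by omega) (by push_cast; omega)]
        rw [if_pos (by simp)]
        simp
      have hx : PySem.List.pyGetD a (i : Int) 0 = a[i] := by
        rw [PySem.List.pyGetD_eq_getElem _ _ (by omega) (by exact_mod_cast hilt)]
        simp
      rw [hprev, hx]
      have hrowsucc : rowF W (rows (a.take i) W) a[i] = rows (a.take (i + 1)) W := by
        have htk : a.take (i + 1) = a.take i ++ [a[i]] := by
          rw [List.take_succ, List.getElem?_eq_getElem hilt]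
          rfl
        rw [rows, rows, htk, List.foldl_append]
        rfl
      rw [hrowsucc]
      rw [PySem.List.pySetD_of_nonneg _ _ (by omega)]
      have htn : ((i : Int) + 1).toNat = i + 1 := by omega
      rw [htn, tbl, set_map_range (a.length + 1) (i + 1) _ _ (by omega)]
      rw [tbl]
      apply List.map_congr_left
      intro k hk
      rcases eq_or_ne k (i + 1) with rfl | hne
      · rw [if_pos rfl, if_pos (by omega)]
      · rw [if_neg hne]
        rcases le_or_gt k i with hle | hgt
        · rw [if_pos hle, if_pos (by omega)]
        · rw [if_neg (by omega), if_neg (by omega)]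

theorem partA_eq_rows (a : List Int) (W : Int) (hW : 0 ≤ W) :
    part_sum1 a W = PySem.List.pyGetD (rows a W) W 0 := by
  have htbl0 : ((PySem.List.pyRange 0 ((a.length : Int) + 1) 1).map
      (fun _ => (PySem.List.pyRange 0 (W + 1) 1).map (fun _ => (0 : Int)))) = tbl a W 0 := by
    have hz : ((PySem.List.pyRange 0 (W + 1) 1).map (fun _ => (0 : Int))) = zerosRow W := by
      rw [PySem.List.pyRange_one, List.map_map, zerosRow]
      have hwn : (W + 1 - 0).toNat = (W + 1).toNat := by omega
      rw [hwn]
      apply List.map_congr_left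
      intro k _
      rfl
    rw [hz, PySem.List.pyRange_one, List.map_map, tbl]
    have hn : ((a.length : Int) + 1 - 0).toNat = a.length + 1 := by omega
    rw [hn]
    apply List.map_congr_left
    intro k hk
    rcases Nat.eq_zero_or_pos k with rfl | hp
    · rw [if_pos (by omega)]
      simp [rows]
    · rw [if_neg (by omega)]
      rfl
  rw [part_sum1]
  simp only []
  rw [htbl0, outer_loop a W hW a.length le_rfl]
  rw [tbl_get a W a.length (a.length : Int) (by omega) (by omega)]
  rw [if_pos (by simp)]
  simp

-- ---------- assembling B ----------

theorem maxD_eq_mx (R : List Int) (h0 : (0:Int) ∈ R) (hnn : ∀ s ∈ R, 0 ≤ s) :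
    (PySem.List.max? R (fun s => s)).getD 0 = mx R := by
  obtain ⟨r, t, rfl⟩ : ∃ r t, R = r :: t := by
    cases R with
    | nil => simp at h0
    | cons r t => exact ⟨r, t, rfl⟩
  rw [PySem.List.max?_id_cons]
  have hr0 : 0 ≤ r := hnn r (by simp)
  simp only [Option.getD_some]
  rw [mx, List.foldl_cons]
  congr 1
  omega

theorem partB_eq_mx (a : List Int) (W : Int) (hW : 0 ≤ W) (ha : ∀ x ∈ a, 0 ≤ x) :
    part_sum1_alt a W = mx (flt (a.foldl (psStep W) (PySem.Set.ofList [0])) W) := by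
  obtain ⟨hL, hG⟩ := rows_link W hW a ha
  obtain ⟨h0, hb⟩ := hG
  rw [part_sum1_alt]
  exact maxD_eq_mx _ (mem_flt.2 ⟨h0, hW⟩) (fun s hs => (hb s (mem_flt.1 hs).1).1)


-- ===== VERDICT (by name: the statement is the Claim_ definition above) =====
theorem part_sum1_spec : Claim_equal_part_sum1 := by
  intro a W _ hpre
  obtain ⟨hW0, ha0⟩ := hpre
  have hW : 0 ≤ W := by omega
  have ha : ∀ x ∈ a, 0 ≤ x := fun x hx => by have := ha0 x hx; omega
  rw [Spec_part_sum1, partA_eq_rows a W hW, partB_eq_mx a W hW ha]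
  obtain ⟨hL, _⟩ := rows_link W hW a ha
  exact hL W hW le_rfl
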